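-- pv_equiv track=rewrite | github.com/abekoh/switch-sql | switch.py | judge_expanded
-- ===== SOURCE A (Python) =====
-- def judge_expanded(parsed):
--     # not-expanded: 0, expanded: 1, error: -1
--     sum_sharp = 0
--     before = ''
--     has_01 = False
--     for current in parsed:
--         if '01.' in current:
--             has_01 = True
--         if has_01 and 'union' in before and 'all' in current:
--             return 1
--         if '##.' in current:
--             sum_sharp += 1
--         before = current
--     if sum_sharp == 1:
--         return 0
--     return -1
-- ===== SOURCE B (Python) =====
-- def judge_expanded(parsed):
--     # not-expanded: 0, expanded: 1, error: -1
--     # Bit-parallel re-implementation: encode each per-token test as one bit of an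
--     # integer mask, then decide everything with integer bit arithmetic:
--     # expanded  <=>  (u << 1) & a & p != 0, where p marks positions at or after the
--     # first '01.' token; error fallback uses a popcount==1 test on the '##.' mask.
--     u = a = o = s = 0
--     bit = 1
--     for t in parsed:
--         if 'union' in t:
--             u |= bit
--         if 'all' in t:
--             a |= bit
--         if '01.' in t:
--             o |= bit
--         if '##.' in t:
--             s |= bit
--         bit <<= 1
--     if o:
--         low = o ^ (o & (o - 1))          # lowest set bit of o = 2**(first '01.' index)
--         p = (bit - 1) ^ (low - 1)        # bits from that index up to the last token
--     else:
--         p = 0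
--     if (u << 1) & a & p:
--         return 1
--     return 0 if s and s & (s - 1) == 0 else -1
-- ===== Notes on version B (the rewrite author's own statement) =====
-- stated objective: alternative
-- what changed: Replaces A's stateful scan (before/has_01/sum_sharp threaded through one loop with an early return) by a bit-parallel formulation: one pass packs the four per-token tests into integer bitmasks, then pure bit arithmetic decides everything - expanded iff (u<<1)&a&p is nonzero (p = bits from the lowest set bit of the '01.' mask upward, computed by the o^(o&(o-1)) lowest-bit trick), and the error fallback is a popcount==1 test s&(s-1)==0 on the '##.' mask.
import Mathlib
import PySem

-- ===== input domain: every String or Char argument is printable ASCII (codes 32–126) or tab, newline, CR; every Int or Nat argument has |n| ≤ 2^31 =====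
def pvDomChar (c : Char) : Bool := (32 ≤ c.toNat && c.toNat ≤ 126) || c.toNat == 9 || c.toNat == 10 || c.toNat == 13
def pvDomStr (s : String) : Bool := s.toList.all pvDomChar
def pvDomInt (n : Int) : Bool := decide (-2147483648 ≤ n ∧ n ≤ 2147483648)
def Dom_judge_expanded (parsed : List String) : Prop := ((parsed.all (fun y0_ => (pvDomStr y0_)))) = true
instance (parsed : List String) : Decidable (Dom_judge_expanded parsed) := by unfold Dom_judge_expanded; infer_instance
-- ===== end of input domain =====

-- B replaces A's stateful early-return scan by a bit-parallel formulation: one pass packs the four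
-- per-token tests into bitmasks, then integer bit arithmetic alone decides the result (alternative).

-- ===== PORT A =====
-- A's single loop: state (sum_sharp, before, has_01), early return 1 on the union/all condition.
def judgeLoopA : List String → Int → String → Bool → Int
  | [], sum_sharp, _, _ => if sum_sharp = 1 then 0 else -1
  | current :: rest, sum_sharp, before, has_01 =>
    let has_01' := has_01 || PySem.Str.isIn "01." current
    if has_01' && PySem.Str.isIn "union" before && PySem.Str.isIn "all" current then 1
    else judgeLoopA rest (sum_sharp + (if PySem.Str.isIn "##." current then 1 else 0)) current has_01'

def judge_expanded (parsed : List String) : Int := judgeLoopA parsed 0 "" false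

-- ===== PORT B =====
-- the mask-building loop of Source B: u,a,o,s accumulate one bit per token, bit walks the positions
def pvBitLoop : List String → Nat → Nat → Nat → Nat → Nat → Nat × Nat × Nat × Nat × Nat
  | [], u, a, o, s, bit => (u, a, o, s, bit)
  | t :: rest, u, a, o, s, bit =>
    pvBitLoop rest
      (if PySem.Str.isIn "union" t then u ||| bit else u)
      (if PySem.Str.isIn "all" t then a ||| bit else a)
      (if PySem.Str.isIn "01." t then o ||| bit else o)
      (if PySem.Str.isIn "##." t then s ||| bit else s)
      (bit <<< 1)

def judge_expanded_alt (parsed : List String) : Int :=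
  match pvBitLoop parsed 0 0 0 0 1 with
  | (u, a, o, s, bit) =>
    -- p: bits from the lowest set bit of o (= first '01.' position) up to the last token
    let p : Nat := if o ≠ 0 then (bit - 1) ^^^ ((o ^^^ (o &&& (o - 1))) - 1) else 0
    if (u <<< 1) &&& a &&& p ≠ 0 then 1
    else if s ≠ 0 ∧ s &&& (s - 1) = 0 then 0 else -1

-- ===== PRECONDITION & SPEC =====
def Spec_judge_expanded (parsed : List String) (out : Int) : Prop := out = judge_expanded_alt parsed
instance (parsed : List String) (out : Int) : Decidable (Spec_judge_expanded parsed out) := by unfold Spec_judge_expanded; infer_instance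

-- ===== CLAIM (what is proved, stated in full; the proofs are below) =====
def Claim_equal_judge_expanded : Prop := ∀ (parsed : List String), Dom_judge_expanded parsed → Spec_judge_expanded parsed (judge_expanded parsed)

-- ===== LEMMAS AND PROOFS =====

-- proof-side: index of the first token containing "01."
def pvIdx01 : List String → Option Nat
  | [] => none
  | t :: rest => if PySem.Str.isIn "01." t then some 0 else (pvIdx01 rest).map (· + 1)

-- proof-side: adjacent-pair scan ('union' in fst and 'all' in snd somewhere)
def pvAnyUnionAll : List (String × String) → Bool
  | [] => false
  | (a, b) :: rest => (PySem.Str.isIn "union" a && PySem.Str.isIn "all" b) || pvAnyUnionAll rest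

-- proof-side: number of tokens containing "##."
def pvCountSharp : List String → Int
  | [] => 0
  | t :: rest => (if PySem.Str.isIn "##." t then 1 else 0) + pvCountSharp rest

-- proof-side: the bitmask of positions whose token satisfies P
def pvMask (P : String → Bool) : List String → Nat
  | [] => 0
  | t :: rest => (if P t then 1 else 0) + 2 * pvMask P rest

-- A's loop once has_01 is true: pair-scan of (before :: rest) against rest
theorem judgeLoopA_true (l : List String) (s : Int) (b : String) :
    judgeLoopA l s b true =
      if pvAnyUnionAll ((b :: l).zip l) then 1
      else if s + pvCountSharp l = 1 then 0 else -1 := by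
  induction l generalizing s b with
  | nil => simp [judgeLoopA, pvAnyUnionAll, pvCountSharp]
  | cons c rest ih =>
    simp only [judgeLoopA, Bool.true_or, Bool.true_and]
    rw [ih]
    simp only [List.zip_cons_cons, pvAnyUnionAll, pvCountSharp]
    split_ifs <;> simp_all [pvAnyUnionAll] <;> try omega

-- A's loop from the initial has_01 = false state, characterised by the first-'01.' index
theorem judgeLoopA_false (l : List String) (s : Int) (b : String) :
    judgeLoopA l s b false =
      match pvIdx01 l with
      | none => if s + pvCountSharp l = 1 then 0 else -1
      | some k =>
        if pvAnyUnionAll (((b :: l).drop k).zip (l.drop k)) then 1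
        else if s + pvCountSharp l = 1 then 0 else -1 := by
  induction l generalizing s b with
  | nil => simp [judgeLoopA, pvIdx01, pvCountSharp]
  | cons c rest ih =>
    by_cases hc : PySem.Str.isIn "01." c = true
    · simp only [judgeLoopA, hc, Bool.false_or, Bool.true_and, pvIdx01, if_pos hc,
        List.drop_zero, List.zip_cons_cons]
      rw [judgeLoopA_true]
      simp only [pvAnyUnionAll, pvCountSharp]
      split_ifs <;> simp_all [pvAnyUnionAll] <;> try omega
    · simp only [Bool.not_eq_true] at hc
      simp only [judgeLoopA, hc, Bool.false_or, Bool.false_and, if_false, pvIdx01,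
        Bool.false_eq_true, pvCountSharp]
      rw [ih]
      cases hk : pvIdx01 rest with
      | none => simp; split_ifs <;> simp_all [pvAnyUnionAll] <;> try omega
      | some k =>
        simp [List.drop_succ_cons]
        split_ifs <;> simp_all [pvAnyUnionAll] <;> try omega

-- bit arithmetic on 'double plus bit' decompositions
theorem pvLandDouble (x y a b : Nat) (hx : x < 2) (hy : y < 2) :
    (x + 2*a) &&& (y + 2*b) = (x &&& y) + 2*(a &&& b) := by
  apply Nat.eq_of_testBit_eq; intro i
  cases i with
  | zero =>
    simp only [Nat.testBit_zero]
    interval_cases x <;> interval_cases y <;> simp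
  | succ i =>
    simp only [Nat.testBit_add_one]
    have h1 : (x + 2*a)/2 = a := by omega
    have h2 : (y + 2*b)/2 = b := by omega
    have h3 : ((x &&& y) + 2*(a &&& b))/2 = a &&& b := by
      have : x &&& y < 2 := by interval_cases x <;> interval_cases y <;> decide
      omega
    rw [Nat.and_div_two, h1, h2, h3]

theorem pvXorDouble (x y a b : Nat) (hx : x < 2) (hy : y < 2) :
    (x + 2*a) ^^^ (y + 2*b) = (x ^^^ y) + 2*(a ^^^ b) := by
  apply Nat.eq_of_testBit_eq; intro i
  cases i with
  | zero =>
    simp only [Nat.testBit_zero]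
    interval_cases x <;> interval_cases y <;> simp <;> omega
  | succ i =>
    simp only [Nat.testBit_add_one]
    have h1 : (x + 2*a)/2 = a := by omega
    have h2 : (y + 2*b)/2 = b := by omega
    have h3 : ((x ^^^ y) + 2*(a ^^^ b))/2 = a ^^^ b := by
      have : x ^^^ y < 2 := by interval_cases x <;> interval_cases y <;> decide
      omega
    rw [Nat.xor_div_two, h1, h2, h3]

-- the mask loop computes exactly the pvMask masks (shifted into the remaining bit positions)
theorem pvBitLoop_spec (l : List String) :
    ∀ (j u a o s : Nat), u < 2^j → a < 2^j → o < 2^j → s < 2^j →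
    pvBitLoop l u a o s (2^j) =
      (u + 2^j * pvMask (PySem.Str.isIn "union") l,
       a + 2^j * pvMask (PySem.Str.isIn "all") l,
       o + 2^j * pvMask (PySem.Str.isIn "01.") l,
       s + 2^j * pvMask (PySem.Str.isIn "##.") l,
       2^(j + l.length)) := by
  induction l with
  | nil => intro j u a o s _ _ _ _; simp [pvBitLoop, pvMask]
  | cons t r ih =>
    intro j u a o s hu ha ho hs
    have hor : ∀ x : Nat, x < 2^j → x ||| 2^j = x + 2^j := by
      intro x hx
      have := (Nat.two_pow_add_eq_or_of_lt hx 1)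
      simpa [Nat.lor_comm, Nat.add_comm] using this.symm
    have hsh : (2:Nat)^j <<< 1 = 2^(j+1) := by
      simp [Nat.shiftLeft_eq, pow_succ]
    simp only [pvBitLoop, hsh]
    have hlt : ∀ x c : Nat, x < 2^j → c < 2 → x + 2^j * 0 ≤ x := by intro x c _ _; omega
    have key : ∀ (x : Nat) (c : Bool), x < 2^j →
        (if c then x ||| 2^j else x) = x + 2^j * (if c then 1 else 0) := by
      intro x c hx; cases c <;> simp [hor x hx]
    rw [key u _ hu, key a _ ha, key o _ ho, key s _ hs]
    have hbound : ∀ (x : Nat) (c : Bool), x < 2^j →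
        x + 2^j * (if c then 1 else 0) < 2^(j+1) := by
      intro x c hx; cases c <;> simp [pow_succ] <;> omega
    rw [ih (j+1) _ _ _ _ (hbound u _ hu) (hbound a _ ha) (hbound o _ ho) (hbound s _ hs)]
    have harith : ∀ (x : Nat) (c : Bool) (m : Nat),
        x + 2^j * (if c then 1 else 0) + 2^(j+1) * m
          = x + 2^j * ((if c then 1 else 0) + 2 * m) := by
      intro x c m; cases c <;> simp [pow_succ] <;> ring
    simp only [pvMask, harith, List.length_cons]
    simp only [Prod.mk.injEq]
    refine ⟨trivial, trivial, trivial, trivial, ?_⟩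
    congr 1
    omega

-- testBit of a pvMask is the per-token predicate (out of range gives the P "" = false default)
theorem pvMask_testBit (P : String → Bool) (hP : P "" = false) (l : List String) :
    ∀ i, (pvMask P l).testBit i = P (l.getD i "") := by
  induction l with
  | nil => intro i; simp [pvMask, hP]
  | cons t r ih =>
    intro i
    cases i with
    | zero =>
      simp only [pvMask, Nat.testBit_zero, List.getD_cons_zero]
      cases h : P t <;> simp [h] <;> omega
    | succ i =>
      simp only [pvMask, Nat.testBit_add_one, List.getD_cons_succ]
      have : ((if P t then 1 else 0) + 2 * pvMask P r) / 2 = pvMask P r := by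
        split_ifs <;> omega
      rw [this, ih]

theorem pvIdx01_none_iff (l : List String) :
    pvIdx01 l = none ↔ pvMask (PySem.Str.isIn "01.") l = 0 := by
  induction l with
  | nil => simp [pvIdx01, pvMask]
  | cons t r ih =>
    by_cases h : PySem.Str.isIn "01." t = true
    · simp only [pvIdx01, pvMask, if_pos h]
      constructor
      · intro hc; cases hc
      · intro hc; omega
    · simp only [pvIdx01, pvMask, if_neg h]
      rw [Option.map_eq_none_iff, ih]
      constructor
      · intro hm; omega
      · intro hm; omega

theorem pvIdx01_lt (l : List String) (k : Nat) (h : pvIdx01 l = some k) : k < l.length := by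
  induction l generalizing k with
  | nil => simp [pvIdx01] at h
  | cons t r ih =>
    by_cases ht : PySem.Str.isIn "01." t = true
    · simp only [pvIdx01, if_pos ht] at h
      cases h
      simp
    · simp only [pvIdx01, if_neg ht] at h
      rcases Option.map_eq_some_iff.mp h with ⟨k', hk', hke⟩
      have := ih k' hk'
      simp only [List.length_cons]
      omega

-- the o ^ (o & (o-1)) trick isolates the lowest set bit = 2 ^ (first '01.' index)
theorem pvLowbit (l : List String) (k : Nat) (h : pvIdx01 l = some k) :
    pvMask (PySem.Str.isIn "01.") l ^^^
      (pvMask (PySem.Str.isIn "01.") l &&& (pvMask (PySem.Str.isIn "01.") l - 1)) = 2 ^ k := by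
  induction l generalizing k with
  | nil => simp [pvIdx01] at h
  | cons t r ih =>
    by_cases ht : PySem.Str.isIn "01." t = true
    · simp only [pvIdx01, if_pos ht] at h
      cases h
      simp only [pvMask, if_pos ht]
      set m := pvMask (PySem.Str.isIn "01.") r with hm
      have hsub : 1 + 2*m - 1 = 0 + 2*m := by omega
      rw [hsub, pvLandDouble 1 0 m m (by omega) (by omega)]
      have : (1 &&& 0 : Nat) + 2 * (m &&& m) = 0 + 2 * m := by simp
      rw [this, pvXorDouble 1 0 m m (by omega) (by omega)]
      simp
    · simp only [pvIdx01, if_neg ht] at h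
      rcases Option.map_eq_some_iff.mp h with ⟨k', hk', hke⟩
      subst hke
      simp only [pvMask, if_neg ht]
      set m := pvMask (PySem.Str.isIn "01.") r with hm
      have hm0 : m ≠ 0 := by
        intro h0
        have := (pvIdx01_none_iff r).mpr h0
        rw [this] at hk'; cases hk'
      have hsub : 0 + 2*m - 1 = 1 + 2*(m-1) := by omega
      have hz : (0:Nat) + 2*m = 2*m := by omega
      rw [hz, ← hz, hsub, pvLandDouble 0 1 m (m-1) (by omega) (by omega)]
      have : (0 &&& 1 : Nat) + 2 * (m &&& (m-1)) = 0 + 2 * (m &&& (m-1)) := by simp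
      rw [this, pvXorDouble 0 0 m (m &&& (m-1)) (by omega) (by omega)]
      have hih : m ^^^ (m &&& (m - 1)) = 2 ^ k' := ih k' hk'
      simp [hih, pow_succ]
      ring

theorem pvSharpZero (l : List String) :
    pvMask (PySem.Str.isIn "##.") l = 0 ↔ pvCountSharp l = 0 := by
  induction l with
  | nil => simp [pvMask, pvCountSharp]
  | cons t r ih =>
    have hnn : 0 ≤ pvCountSharp r := by
      clear ih
      induction r with
      | nil => simp [pvCountSharp]
      | cons a b ihb => simp only [pvCountSharp]; split_ifs <;> omega
    simp only [pvMask, pvCountSharp]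
    split_ifs with ht
    · constructor <;> intro h <;> omega
    · constructor
      · intro h
        have h2 := ih.mp (by omega : pvMask (PySem.Str.isIn "##.") r = 0)
        omega
      · intro h
        have h2 := ih.mpr (by omega : pvCountSharp r = 0)
        omega

-- popcount-one test on the '##.' mask ⇔ exactly one '##.' token
theorem pvSharpOne (l : List String) :
    (pvMask (PySem.Str.isIn "##.") l ≠ 0 ∧
     pvMask (PySem.Str.isIn "##.") l &&& (pvMask (PySem.Str.isIn "##.") l - 1) = 0)
      ↔ pvCountSharp l = 1 := by
  induction l with
  | nil => simp [pvMask, pvCountSharp]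
  | cons t r ih =>
    have hnn : 0 ≤ pvCountSharp r := by
      clear ih
      induction r with
      | nil => simp [pvCountSharp]
      | cons a b ihb => simp only [pvCountSharp]; split_ifs <;> omega
    simp only [pvMask, pvCountSharp]
    set m := pvMask (PySem.Str.isIn "##.") r with hm
    split_ifs with ht
    · -- head token has '##.': need remaining count zero
      have hsub : 1 + 2*m - 1 = 0 + 2*m := by omega
      rw [hsub, pvLandDouble 1 0 m m (by omega) (by omega)]
      simp only [show (1 &&& 0 : Nat) = 0 by decide, Nat.and_self]
      constructor
      · rintro ⟨-, h2⟩
        have : m = 0 := by omega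
        have := (pvSharpZero r).mp this
        omega
      · intro h
        have hc : pvCountSharp r = 0 := by omega
        have : m = 0 := (pvSharpZero r).mpr hc
        constructor <;> omega
    · by_cases hm0 : m = 0
      · have := (pvSharpZero r).mp hm0
        simp [hm0]; omega
      · have hsub : 0 + 2*m - 1 = 1 + 2*(m-1) := by omega
        have hz : (0:Nat) + 2*m = 2*m := by omega
        rw [hz, ← hz, hsub, pvLandDouble 0 1 m (m-1) (by omega) (by omega)]
        simp only [show (0 &&& 1 : Nat) = 0 by decide]
        constructor
        · rintro ⟨-, h2⟩
          have : m &&& (m-1) = 0 := by omega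
          have := ih.mp ⟨hm0, this⟩
          omega
        · intro h
          have := ih.mpr (by omega)
          constructor <;> omega

-- the index form of the union/all adjacency condition (from position ≥ max(k,1))
def pvCondIdx (l : List String) (k : Nat) : Prop :=
  ∃ j, 1 ≤ j ∧ k ≤ j ∧ j < l.length ∧
    (PySem.Str.isIn "union" (l.getD (j-1) "") && PySem.Str.isIn "all" (l.getD j "")) = true

theorem pvAnyUnionAll_zip_iff (m : List String) :
    ∀ b, pvAnyUnionAll ((b :: m).zip m) = true ↔
      ∃ i, i < m.length ∧
        (PySem.Str.isIn "union" ((b :: m).getD i "") && PySem.Str.isIn "all" (m.getD i "")) = true := by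
  induction m with
  | nil => intro b; simp [pvAnyUnionAll]
  | cons c r ih =>
    intro b
    simp only [List.zip_cons_cons, pvAnyUnionAll, Bool.or_eq_true]
    constructor
    · rintro (h | h)
      · exact ⟨0, by simp, by simpa using h⟩
      · obtain ⟨i, hi, hh⟩ := (ih c).mp h
        exact ⟨i+1, by simpa using hi, by simpa using hh⟩
    · rintro ⟨i, hi, hh⟩
      cases i with
      | zero => exact Or.inl (by simpa using hh)
      | succ i =>
        right
        exact (ih c).mpr ⟨i, by simpa using hi, by simpa using hh⟩

theorem pvGetD_drop (l : List String) (k i : Nat) :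
    (l.drop k).getD i "" = l.getD (k + i) "" := by
  simp [List.getD_eq_getElem?_getD, List.getElem?_drop]

-- A's suffix pair-scan, in index form
theorem pvDropScan_iff (l : List String) (k : Nat) (hk : k < l.length) :
    pvAnyUnionAll ((("" :: l).drop k).zip (l.drop k)) = true ↔ pvCondIdx l k := by
  have hd : ("" :: l).drop k = (if k = 0 then "" else l.getD (k-1) "") :: l.drop k := by
    cases k with
    | zero => simp
    | succ k' =>
      simp only [List.drop_succ_cons]
      have hk' : k' < l.length := by omega
      rw [List.drop_eq_getElem_cons hk']
      simp [List.getD_eq_getElem?_getD, List.getElem?_eq_getElem hk']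
  rw [hd, pvAnyUnionAll_zip_iff]
  constructor
  · rintro ⟨i, hi, hh⟩
    rw [List.length_drop] at hi
    cases i with
    | zero =>
      by_cases hk0 : k = 0
      · subst hk0
        simp at hh
        exact absurd hh.1 (by decide)
      · refine ⟨k, by omega, le_refl k, hk, ?_⟩
        simp only [List.getD_cons_zero, if_neg hk0] at hh
        rw [pvGetD_drop] at hh
        simpa using hh
    | succ i =>
      refine ⟨k + (i+1), by omega, by omega, by omega, ?_⟩
      simp only [List.getD_cons_succ] at hh
      rw [pvGetD_drop, pvGetD_drop] at hh
      have e1 : k + (i+1) - 1 = k + i := by omega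
      rw [e1]
      exact hh
  · rintro ⟨j, hj1, hjk, hjn, hh⟩
    by_cases hjk0 : j = k
    · subst hjk0
      refine ⟨0, by rw [List.length_drop]; omega, ?_⟩
      simp only [List.getD_cons_zero, if_neg (by omega : ¬ j = 0)]
      rw [pvGetD_drop]
      simpa [Nat.add_zero] using hh
    · refine ⟨j - k, by rw [List.length_drop]; omega, ?_⟩
      have e0 : j - k = (j - k - 1) + 1 := by omega
      rw [e0]
      simp only [List.getD_cons_succ]
      rw [pvGetD_drop, pvGetD_drop]
      have e1 : k + (j - k - 1) = j - 1 := by omega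
      have e2 : k + ((j - k - 1) + 1) = j := by omega
      rw [e1, e2]
      exact hh

-- the bitmask test, in the same index form
theorem pvBitCond_iff (l : List String) (k : Nat) (hk : k < l.length) :
    ((pvMask (PySem.Str.isIn "union") l <<< 1) &&& pvMask (PySem.Str.isIn "all") l &&&
      ((2 ^ l.length - 1) ^^^ (2 ^ k - 1)) ≠ 0) ↔ pvCondIdx l k := by
  have hU := pvMask_testBit (PySem.Str.isIn "union") (by decide) l
  have hA := pvMask_testBit (PySem.Str.isIn "all") (by decide) l
  constructor
  · intro h
    obtain ⟨i, hi⟩ := Nat.exists_testBit_of_ne_zero h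
    simp only [Nat.testBit_and, Nat.testBit_xor, Nat.testBit_shiftLeft,
      Nat.testBit_two_pow_sub_one, hU, hA, Bool.and_eq_true, bne_iff_ne,
      decide_eq_true_eq] at hi
    obtain ⟨⟨⟨h1, h2⟩, h3⟩, h4⟩ := hi
    have hik : ¬ (i < k) := by
      intro hik
      have : i < l.length := by omega
      simp [this, hik] at h4
    have hin : i < l.length := by
      by_contra hin
      simp [hin, show ¬ i < k by omega] at h4
    refine ⟨i, h1, by omega, hin, ?_⟩
    rw [Bool.and_eq_true]
    exact ⟨h2, h3⟩
  · rintro ⟨j, hj1, hjk, hjn, hh⟩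
    intro h0
    have : ((pvMask (PySem.Str.isIn "union") l <<< 1) &&& pvMask (PySem.Str.isIn "all") l &&&
        ((2 ^ l.length - 1) ^^^ (2 ^ k - 1))).testBit j = true := by
      simp only [Nat.testBit_and, Nat.testBit_xor, Nat.testBit_shiftLeft,
        Nat.testBit_two_pow_sub_one, hU, hA]
      simp only [Bool.and_eq_true, bne_iff_ne, decide_eq_true_eq] at hh ⊢
      refine ⟨⟨⟨hj1, hh.1⟩, hh.2⟩, ?_⟩
      simp [show j < l.length from hjn, show ¬ j < k by omega]
    rw [h0] at this
    simp at this

-- ===== VERDICT (by name: the statement is the Claim_ definition above) =====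
theorem judge_expanded_spec : Claim_equal_judge_expanded := by
  intro parsed _
  show judge_expanded parsed = judge_expanded_alt parsed
  unfold judge_expanded judge_expanded_alt
  have hloop := pvBitLoop_spec parsed 0 0 0 0 0 (by norm_num) (by norm_num) (by norm_num) (by norm_num)
  simp only [pow_zero, one_mul, zero_add, Nat.zero_add] at hloop
  rw [hloop, judgeLoopA_false]
  cases hk : pvIdx01 parsed with
  | none =>
    have ho : pvMask (PySem.Str.isIn "01.") parsed = 0 := (pvIdx01_none_iff parsed).mp hk
    simp only [ho, ne_eq, Nat.and_zero, zero_add, not_true_eq_false, if_false,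
      not_false_eq_true, Nat.zero_shiftLeft]
    by_cases hcnt : pvCountSharp parsed = 1
    · rw [if_pos hcnt, if_pos ((pvSharpOne parsed).mpr hcnt)]
    · rw [if_neg hcnt, if_neg (fun hc => hcnt ((pvSharpOne parsed).mp hc))]
  | some k =>
    have hklt : k < parsed.length := pvIdx01_lt parsed k hk
    have ho : pvMask (PySem.Str.isIn "01.") parsed ≠ 0 := by
      intro h0
      rw [(pvIdx01_none_iff parsed).mpr h0] at hk; cases hk
    simp only [ne_eq, if_pos ho]
    rw [pvLowbit parsed k hk, zero_add]
    by_cases hcond : pvCondIdx parsed k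
    · rw [if_pos ((pvDropScan_iff parsed k hklt).mpr hcond),
        if_pos ((pvBitCond_iff parsed k hklt).mpr hcond)]
    · rw [if_neg (fun hc => hcond ((pvDropScan_iff parsed k hklt).mp hc)),
        if_neg (fun hc => hcond ((pvBitCond_iff parsed k hklt).mp hc))]
      by_cases hcnt : pvCountSharp parsed = 1
      · rw [if_pos hcnt, if_pos ((pvSharpOne parsed).mpr hcnt)]
      · rw [if_neg hcnt, if_neg (fun hc => hcnt ((pvSharpOne parsed).mp hc))]
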